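-- pv_equiv track=rewrite | github.com/zhou-jk/kv-cache-hackthon | policy.py | _contiguous_prefix_len
-- ===== SOURCE A (Python) =====
-- from typing import Any, Dict, Iterable, List, Optional, Sequence, Tuple, Set
--
-- def _contiguous_prefix_len(blocks: Iterable[int]) -> int:
--     """
--     计算从 1 开始的“连续前缀长度”：
--     例如 {1,2,3,5,8} -> 3；{2,3,4} -> 0；{1,2,6} -> 2
--     """
--     s = set(blocks)
--     if 1 not in s:
--         return 0
--     k = 1
--     # 在端侧/题目 trace 中，编号一般不离谱；逐步判断足够快
--     while (k + 1) in s: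
--         k += 1
--     return k
-- ===== SOURCE B (Python) =====
-- def _contiguous_prefix_len(blocks):
--     """Sort the distinct values once, then one linear sweep counting the run 1,2,3,..."""
--     count = 0
--     for v in sorted(set(blocks)):
--         if v == count + 1:
--             count += 1
--         elif v > count + 1:
--             break
--     return count
-- ===== Notes on version B (the rewrite author's own statement) =====
-- stated objective: alternative
-- what changed: Replaces the while-loop of repeated set-membership probes (1 in s, 2 in s, ...) by sorting the distinct values once and counting the contiguous run 1,2,3,... in a single sweep that breaks at the first gap.
import Mathlib
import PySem

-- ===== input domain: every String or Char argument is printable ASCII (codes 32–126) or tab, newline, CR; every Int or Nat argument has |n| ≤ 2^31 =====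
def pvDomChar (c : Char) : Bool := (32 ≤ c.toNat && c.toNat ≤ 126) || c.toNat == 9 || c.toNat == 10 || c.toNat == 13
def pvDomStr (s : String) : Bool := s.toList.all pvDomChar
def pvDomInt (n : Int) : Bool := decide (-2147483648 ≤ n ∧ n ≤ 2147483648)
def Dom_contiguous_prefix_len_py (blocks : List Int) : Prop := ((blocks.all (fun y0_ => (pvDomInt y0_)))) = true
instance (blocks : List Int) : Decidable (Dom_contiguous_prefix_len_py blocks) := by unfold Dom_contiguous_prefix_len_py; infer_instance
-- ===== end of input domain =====

-- B replaces A's upward membership-probe loop by sorting the distinct values once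
-- and counting the contiguous run 1,2,3,... in a single sweep (objective: alternative).


-- ===== PORT A =====
-- termination helper for A's while-loop: a member is at most the running foldr max
theorem pvMemLeFoldrMax (s : List Int) (x : Int) (h : x ∈ s) : x ≤ s.foldr max 0 := by
  induction s with
  | nil => cases h
  | cons a t ih =>
    rcases List.mem_cons.mp h with h | h
    · subst h; exact le_max_left _ _
    · exact le_trans (ih h) (le_max_right _ _)

-- 'k = 1; while (k+1) in s: k += 1; return k'
def pvAloop (s : List Int) (k : Int) : Int :=
  if (k + 1) ∈ s then pvAloop s (k + 1) else k
termination_by (s.foldr max 0 + 1 - k).toNat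
decreasing_by
  have := pvMemLeFoldrMax s (k + 1) (by assumption)
  omega

def contiguous_prefix_len_py (blocks : List Int) : Int :=
  let s := PySem.Set.ofList blocks
  if (1 : Int) ∈ s then pvAloop s 1 else 0

-- ===== PORT B =====
-- the sweep: 'for v in ordered: if v == count+1: count += 1 elif v > count+1: break'
def pvBsweep (l : List Int) (count : Int) : Int :=
  match l with
  | [] => count
  | v :: rest =>
    if v = count + 1 then pvBsweep rest (count + 1)
    else if v > count + 1 then count
    else pvBsweep rest count

def contiguous_prefix_len_py_alt (blocks : List Int) : Int :=
  pvBsweep (PySem.List.sorted (PySem.Set.ofList blocks) (fun x => x) false) 0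

-- ===== PRECONDITION & SPEC =====
def Spec_contiguous_prefix_len_py (blocks : List Int) (out : Int) : Prop := out = contiguous_prefix_len_py_alt blocks
instance (blocks : List Int) (out : Int) : Decidable (Spec_contiguous_prefix_len_py blocks out) := by unfold Spec_contiguous_prefix_len_py; infer_instance

-- ===== CLAIM (what is proved, stated in full; the proofs are below) =====
def Claim_equal_contiguous_prefix_len_py : Prop := ∀ (blocks : List Int), Dom_contiguous_prefix_len_py blocks → Spec_contiguous_prefix_len_py blocks (contiguous_prefix_len_py blocks)

-- ===== LEMMAS AND PROOFS =====

-- A's loop lands on a K ≥ k with (k, K] ⊆ s and K+1 ∉ s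
theorem pvAloop_spec (s : List Int) (k : Int) :
    k ≤ pvAloop s k ∧ (∀ i : Int, k < i → i ≤ pvAloop s k → i ∈ s) ∧ (pvAloop s k + 1) ∉ s := by
  induction k using pvAloop.induct (s := s) with
  | case1 k hmem ih =>
    rw [pvAloop, if_pos hmem]
    refine ⟨by have := ih.1; omega, fun i h1 h2 => ?_, ih.2.2⟩
    by_cases hi : i = k + 1
    · subst hi; exact hmem
    · exact ih.2.1 i (by omega) h2
  | case2 k hmem =>
    rw [pvAloop, if_neg hmem]
    exact ⟨le_refl _, fun i h1 h2 => absurd h2 (by omega), hmem⟩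

-- B's sweep over a strictly increasing list lands on the same kind of K
theorem pvBsweep_spec (l : List Int) (hp : l.Pairwise (· < ·)) (c : Int) :
    c ≤ pvBsweep l c ∧ (∀ i : Int, c < i → i ≤ pvBsweep l c → i ∈ l) ∧ (pvBsweep l c + 1) ∉ l := by
  induction l generalizing c with
  | nil => simp [pvBsweep]
  | cons v rest ih =>
    have hvr : ∀ x ∈ rest, v < x := (List.pairwise_cons.mp hp).1
    have hrest := (List.pairwise_cons.mp hp).2
    by_cases h1 : v = c + 1
    · have := ih hrest (c + 1)
      rw [pvBsweep, if_pos h1]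
      refine ⟨by omega, fun i hi1 hi2 => ?_, ?_⟩
      · by_cases hi : i = c + 1
        · exact List.mem_cons.mpr (Or.inl (by omega))
        · exact List.mem_cons_of_mem _ (this.2.1 i (by omega) hi2)
      · intro hmem
        rcases List.mem_cons.mp hmem with h | h
        · have := this.1; omega
        · exact this.2.2 h
    · by_cases h2 : v > c + 1
      · rw [pvBsweep, if_neg h1, if_pos h2]
        refine ⟨le_refl _, fun i hi1 hi2 => absurd hi2 (by omega), ?_⟩
        intro hmem
        rcases List.mem_cons.mp hmem with h | h
        · omega
        · have := hvr _ h; omega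
      · have := ih hrest c
        rw [pvBsweep, if_neg h1, if_neg h2]
        refine ⟨this.1, fun i hi1 hi2 => List.mem_cons_of_mem _ (this.2.1 i hi1 hi2), ?_⟩
        intro hmem
        rcases List.mem_cons.mp hmem with h | h
        · omega
        · exact this.2.2 h

-- both results satisfy the same characterisation, which is unique
theorem pvUnique (s : List Int) (a b : Int)
    (ha : (∀ i : Int, 1 ≤ i → i ≤ a → i ∈ s) ∧ (a + 1) ∉ s ∧ 0 ≤ a)
    (hb : (∀ i : Int, 1 ≤ i → i ≤ b → i ∈ s) ∧ (b + 1) ∉ s ∧ 0 ≤ b) : a = b := by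
  by_contra hne
  rcases lt_or_gt_of_ne hne with h | h
  · exact ha.2.1 (hb.1 (a + 1) (by omega) (by omega))
  · exact hb.2.1 (ha.1 (b + 1) (by omega) (by omega))

-- ===== VERDICT (by name: the statement is the Claim_ definition above) =====
theorem contiguous_prefix_len_py_spec : Claim_equal_contiguous_prefix_len_py := by
  intro blocks _
  unfold Spec_contiguous_prefix_len_py contiguous_prefix_len_py contiguous_prefix_len_py_alt
  set s := PySem.Set.ofList blocks with hs
  set l := PySem.List.sorted s (fun x => x) false with hl
  have hmem : ∀ x : Int, x ∈ l ↔ x ∈ s := fun x => PySem.List.mem_sorted _ _ _ x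
  have hp : l.Pairwise (· < ·) := PySem.List.sorted_ofList_pairwise_lt blocks
  have hB := pvBsweep_spec l hp 0
  have hb : (∀ i : Int, 1 ≤ i → i ≤ pvBsweep l 0 → i ∈ s) ∧ (pvBsweep l 0 + 1) ∉ s ∧ 0 ≤ pvBsweep l 0 :=
    ⟨fun i h1 h2 => (hmem i).mp (hB.2.1 i (by omega) h2),
     fun h => hB.2.2 ((hmem _).mpr h), hB.1⟩
  by_cases h1 : (1 : Int) ∈ s
  · simp only [if_pos h1]
    have hA := pvAloop_spec s 1
    exact pvUnique s _ _
      ⟨fun i hi1 hi2 => by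
        by_cases hi : i = 1
        · exact hi ▸ h1
        · exact hA.2.1 i (by omega) hi2,
       hA.2.2, by have := hA.1; omega⟩ hb
  · simp only [if_neg h1]
    exact pvUnique s _ _
      ⟨fun i hi1 hi2 => absurd hi2 (by omega), by simpa using h1, le_refl 0⟩ hb
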